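-- pv_equiv track=rewrite | github.com/jeury301/code-fights | arcade/intro/b. 12. sort-by-height/sort_by_height.py | sortByHeight
-- ===== SOURCE A (Python) =====
-- def sortByHeight(a):
--     trees = {}
--     not_trees = []
--
--     for i, x in enumerate(a):
--         if x == -1:
--             trees[i] = -1
--         else:
--             not_trees.append(x)
--     not_trees = sorted(not_trees)
--
--     final = []
--     index = 0
--     for i in range(len(a)):
--         if trees.get(i):
--             final.append(trees.get(i))
--         else:
--             final.append(not_trees[index])
--             index += 1
--     return final
-- ===== SOURCE B (Python) =====
-- def sortByHeight(a):
--     vals = [x for x in a if x != -1]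
--     out = []
--     for x in a:
--         if x == -1:
--             out.append(-1)
--         else:
--             m = min(vals)
--             vals.remove(m)
--             out.append(m)
--     return out
-- ===== Notes on version B (the rewrite author's own statement) =====
-- stated objective: alternative
-- what changed: Replaces A's dict-of-tree-positions, library sort and counter-indexed refill pass with a single output pass that does no pre-sorting: at each non-(-1) slot it extracts the minimum of the remaining unplaced values (selection during the merge).
import Mathlib
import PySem

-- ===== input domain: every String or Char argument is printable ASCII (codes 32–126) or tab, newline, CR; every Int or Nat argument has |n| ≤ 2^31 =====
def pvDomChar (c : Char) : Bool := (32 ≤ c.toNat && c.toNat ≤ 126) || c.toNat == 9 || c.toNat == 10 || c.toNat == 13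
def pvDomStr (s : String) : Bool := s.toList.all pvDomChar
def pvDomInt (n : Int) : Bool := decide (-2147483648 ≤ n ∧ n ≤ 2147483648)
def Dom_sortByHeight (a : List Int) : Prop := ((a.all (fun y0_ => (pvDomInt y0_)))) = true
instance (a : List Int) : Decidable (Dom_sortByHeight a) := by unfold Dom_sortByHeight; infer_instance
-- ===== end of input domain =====

-- B replaces A's dict-of-tree-positions, library sort and counter-indexed refill pass with a
-- single output pass that does no pre-sorting: at each non-(-1) slot it extracts the minimum
-- of the remaining unplaced values (objective: alternative; not faster).

-- ===== PORT A =====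
-- trees.get(i) is None or -1 here; Python truthiness of that value is 'getD i 0 ≠ 0'.
-- not_trees[index] is always in range on reachable states, so pyGet?'s '.getD 0' is never taken.
def sortByHeight (a : List Int) : List Int :=
  let p := (PySem.List.enumerate a).foldl
    (fun (st : PySem.Dict Int Int × List Int) ix =>
      if ix.2 = -1 then (st.1.insert ix.1 (-1), st.2) else (st.1, st.2 ++ [ix.2]))
    (PySem.Dict.empty, [])
  let trees := p.1
  let not_trees := PySem.List.sorted p.2 (fun x => x) false
  let q := (PySem.List.pyRange 0 (a.length : Int) 1).foldl
    (fun (st : List Int × Int) i =>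
      if PySem.Dict.getD trees i 0 ≠ 0 then (st.1 ++ [PySem.Dict.getD trees i 0], st.2)
      else (st.1 ++ [(PySem.List.pyGet? not_trees st.2).getD 0], st.2 + 1))
    ([], 0)
  q.1

-- ===== PORT B =====
-- the output loop: 'vals' shrinks by min-extraction; min(vals)/vals.remove(m) never see an
-- empty/non-member state on reachable inputs, so the '.getD' defaults are never taken.
def mergeMin : List Int → List Int → List Int
  | [], _ => []
  | x :: xs, vs =>
    if x = -1 then -1 :: mergeMin xs vs
    else
      let m := (PySem.List.min? vs (fun y => y)).getD 0
      m :: mergeMin xs ((PySem.List.remove? vs m).getD vs)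

def sortByHeight_alt (a : List Int) : List Int :=
  mergeMin a (a.filter (fun x => decide (x ≠ -1)))

-- ===== PRECONDITION & SPEC =====
def Spec_sortByHeight (a : List Int) (out : List Int) : Prop := out = sortByHeight_alt a
instance (a : List Int) (out : List Int) : Decidable (Spec_sortByHeight a out) := by unfold Spec_sortByHeight; infer_instance

-- ===== CLAIM (what is proved, stated in full; the proofs are below) =====
def Claim_equal_sortByHeight : Prop := ∀ (a : List Int), Dom_sortByHeight a → Spec_sortByHeight a (sortByHeight a)

-- ===== LEMMAS AND PROOFS =====

-- proof-side helper: consume a pre-sorted stream past the -1 slots (the common shape both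
-- ports are reduced to)
def mergeNext : List Int → List Int → List Int
  | [], _ => []
  | x :: xs, vs => if x = -1 then x :: mergeNext xs vs
                   else vs.headD 0 :: mergeNext xs vs.tail

-- A's first loop: the collected non-(-1) values are a filter of the input
lemma phase1_snd (xs : List Int) (s : Int) (d0 : PySem.Dict Int Int) (acc : List Int) :
    ((PySem.List.enumerate xs s).foldl
      (fun (st : PySem.Dict Int Int × List Int) ix =>
        if ix.2 = -1 then (st.1.insert ix.1 (-1), st.2) else (st.1, st.2 ++ [ix.2]))
      (d0, acc)).2 = acc ++ xs.filter (fun x => decide (x ≠ -1)) := by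
  induction xs generalizing s d0 acc with
  | nil => simp [PySem.List.enumerate_nil]
  | cons x xs ih =>
    rw [PySem.List.enumerate_cons]
    by_cases hx : x = -1 <;> simp [List.foldl_cons, hx, ih]

-- A's first loop: indices not naming a -1 entry are absent from the dict
lemma phase1_get?_neg (xs : List Int) (s : Int) (d0 : PySem.Dict Int Int) (acc : List Int)
    (i : Int) (h : ∀ j : Nat, i = s + j → xs[j]? ≠ some (-1)) :
    (((PySem.List.enumerate xs s).foldl
      (fun (st : PySem.Dict Int Int × List Int) ix =>
        if ix.2 = -1 then (st.1.insert ix.1 (-1), st.2) else (st.1, st.2 ++ [ix.2]))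
      (d0, acc)).1).get? i = d0.get? i := by
  induction xs generalizing s d0 acc with
  | nil => simp [PySem.List.enumerate_nil]
  | cons x xs ih =>
    have htail : ∀ j : Nat, i = (s + 1) + j → xs[j]? ≠ some (-1) := by
      intro j hj
      have := h (j + 1) (by push_cast; omega)
      simpa using this
    rw [PySem.List.enumerate_cons]
    by_cases hx : x = -1
    · have hne : i ≠ s := by
        intro he
        exact h 0 (by omega) (by simp [hx])
      simp only [List.foldl_cons, hx]
      rw [ih (s + 1) _ _ htail]
      exact PySem.Dict.get?_insert_of_ne _ _ hne
    · simp only [List.foldl_cons, if_neg hx]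
      exact ih (s + 1) _ _ htail

-- A's first loop: indices naming a -1 entry map to -1 in the dict
lemma phase1_get?_pos (xs : List Int) (s : Int) (d0 : PySem.Dict Int Int) (acc : List Int)
    (j : Nat) (hj : xs[j]? = some (-1)) :
    (((PySem.List.enumerate xs s).foldl
      (fun (st : PySem.Dict Int Int × List Int) ix =>
        if ix.2 = -1 then (st.1.insert ix.1 (-1), st.2) else (st.1, st.2 ++ [ix.2]))
      (d0, acc)).1).get? (s + j) = some (-1) := by
  induction xs generalizing s d0 acc j with
  | nil => simp at hj
  | cons x xs ih =>
    rw [PySem.List.enumerate_cons]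
    cases j with
    | zero =>
      have hx : x = -1 := by simpa using hj
      simp only [List.foldl_cons, hx]
      rw [phase1_get?_neg xs (s + 1) _ _ (s + (0 : Nat))
        (by intro j hj2 _; push_cast at hj2; omega)]
      simp [PySem.Dict.get?_insert_self]
    | succ j' =>
      have hj' : xs[j']? = some (-1) := by simpa using hj
      have hcast : s + ((j' : Int) + 1) = (s + 1) + (j' : Int) := by ring
      by_cases hx : x = -1
      · simp only [List.foldl_cons, hx]
        have := ih (s + 1) (d0.insert s (-1)) acc j' hj'
        push_cast
        rw [hcast]; exact this
      · simp only [List.foldl_cons, if_neg hx]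
        have := ih (s + 1) d0 (acc ++ [x]) j' hj'
        push_cast
        rw [hcast]; exact this

-- A's second loop equals the stream merge, generalized over the remaining suffix (a.drop k)
-- and the stream position m; T is the tree dict, s the sorted non-(-1) values.
lemma loop2_eq (a : List Int) (T : PySem.Dict Int Int) (s : List Int)
    (hpos : ∀ (k : Nat) (hk : k < a.length), a[k] = -1 → T.get? (k : Int) = some (-1))
    (hneg : ∀ (k : Nat) (hk : k < a.length), a[k] ≠ -1 → T.get? (k : Int) = none) :
    ∀ (xs : List Int) (k : Nat), a.drop k = xs → ∀ (acc : List Int) (m : Nat),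
    ((PySem.List.pyRange (k : Int) (a.length : Int) 1).foldl
      (fun (st : List Int × Int) i =>
        if PySem.Dict.getD T i 0 ≠ 0 then (st.1 ++ [PySem.Dict.getD T i 0], st.2)
        else (st.1 ++ [(PySem.List.pyGet? s st.2).getD 0], st.2 + 1))
      (acc, (m : Int))).1
    = acc ++ mergeNext xs (s.drop m) := by
  intro xs
  induction xs with
  | nil =>
    intro k hk acc m
    have hlen : a.length ≤ k := by
      by_contra h
      rw [List.drop_eq_nil_iff] at hk
      omega
    rw [PySem.List.pyRange_one_eq_nil (by exact_mod_cast hlen)]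
    simp [mergeNext]
  | cons x xs ih =>
    intro k hk acc m
    have hklt : k < a.length := by
      by_contra h
      rw [List.drop_eq_nil_of_le (by omega)] at hk; simp at hk
    have hsplit := List.getElem_cons_drop (as := a) (i := k) (h := hklt)
    rw [hk] at hsplit
    have hx : a[k] = x := by
      have := hsplit.symm; injection this with h1 _; exact h1.symm
    have hxs : a.drop (k + 1) = xs := by
      have := hsplit.symm; injection this with _ h2; exact h2.symm
    rw [PySem.List.pyRange_one_cons (by exact_mod_cast hklt)]
    rw [List.foldl_cons]
    by_cases hm1 : x = -1
    · have hget : T.get? (k : Int) = some (-1) := hpos k hklt (hx.trans hm1)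
      have hgd : PySem.Dict.getD T (k : Int) 0 = -1 := by
        simp [PySem.Dict.getD, hget]
      rw [if_pos (by rw [hgd]; decide)]
      rw [hgd]
      have : ((k : Int) + 1) = ((k + 1 : Nat) : Int) := by push_cast; ring
      rw [this, ih (k + 1) hxs (acc ++ [-1]) m]
      simp [mergeNext, hm1]
    · have hget : T.get? (k : Int) = none := hneg k hklt (by rw [hx]; exact hm1)
      have hgd : PySem.Dict.getD T (k : Int) 0 = 0 := by
        simp [PySem.Dict.getD, hget]
      rw [if_neg (by rw [hgd]; simp)]
      have hsm : (PySem.List.pyGet? s (m : Int)).getD 0 = (s.drop m).headD 0 := by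
        rw [PySem.List.pyGet?_natCast s m, List.headD_eq_head?_getD, List.head?_drop]
      have hc1 : ((m : Int) + 1) = ((m + 1 : Nat) : Int) := by push_cast; ring
      have hc2 : ((k : Int) + 1) = ((k + 1 : Nat) : Int) := by push_cast; ring
      rw [hsm, hc1, hc2, ih (k + 1) hxs _ (m + 1)]
      have htl : (s.drop m).tail = s.drop (m + 1) := List.tail_drop
      simp [mergeNext, hm1, htl]

-- the sorted list of a nonempty vs is its minimum followed by the sorted list of the rest
lemma sorted_min_cons (vs : List Int) (m : Int)
    (hm : PySem.List.min? vs (fun y => y) = some m) :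
    PySem.List.sorted vs (fun y => y) false
      = m :: PySem.List.sorted (vs.erase m) (fun y => y) false := by
  have hmem : m ∈ vs := PySem.List.min?_mem hm
  apply PySem.List.sorted_id_eq_of_perm_of_pairwise
  · exact ((PySem.List.sorted_perm _ _ _).cons m).trans (List.perm_cons_erase hmem).symm
  · refine List.pairwise_cons.2 ⟨?_, PySem.List.sorted_pairwise _ _⟩
    intro y hy
    have : y ∈ vs := (vs.erase_subset) ((PySem.List.mem_sorted _ _ _ _).1 hy)
    exact PySem.List.min?_isMin hm y this

-- B's merge pass with min-extraction equals the stream merge over the pre-sorted values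
lemma mergeMin_eq_mergeNext (xs : List Int) : ∀ (vs : List Int),
    xs.countP (fun x => decide (x ≠ -1)) ≤ vs.length →
    mergeMin xs vs = mergeNext xs (PySem.List.sorted vs (fun y => y) false) := by
  induction xs with
  | nil => intro vs _; simp [mergeMin, mergeNext]
  | cons x xs ih =>
    intro vs h
    by_cases hx : x = -1
    · rw [mergeMin, mergeNext, if_pos hx, if_pos hx, hx]
      have h' : xs.countP (fun x => decide (x ≠ -1)) ≤ vs.length := by
        rw [List.countP_cons] at h; omega
      rw [ih vs h']
    · have hcnt : xs.countP (fun x => decide (x ≠ -1)) + 1 ≤ vs.length := by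
        rw [List.countP_cons, if_pos (by simpa using hx)] at h; omega
      have hvs : vs ≠ [] := by
        intro he; rw [he] at hcnt; simp at hcnt
      obtain ⟨m, hm⟩ : ∃ m, PySem.List.min? vs (fun y => y) = some m := by
        cases hmm : PySem.List.min? vs (fun y => y) with
        | none => exact absurd ((PySem.List.min?_eq_none_iff _ _).1 hmm) hvs
        | some m => exact ⟨m, rfl⟩
      have hmem : m ∈ vs := PySem.List.min?_mem hm
      rw [mergeMin, mergeNext, if_neg hx, if_neg hx]
      simp only [hm, Option.getD_some]
      rw [PySem.List.remove?_eq_some_erase vs m hmem, sorted_min_cons vs m hm]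
      simp only [Option.getD_some, List.headD_cons, List.tail_cons]
      have h' : xs.countP (fun x => decide (x ≠ -1)) ≤ (vs.erase m).length := by
        rw [List.length_erase_of_mem hmem]; omega
      rw [ih (vs.erase m) h']

-- ===== VERDICT (by name: the statement is the Claim_ definition above) =====
theorem sortByHeight_spec : Claim_equal_sortByHeight := by
  intro a _
  unfold Spec_sortByHeight sortByHeight sortByHeight_alt
  simp only []
  rw [phase1_snd a 0 PySem.Dict.empty []]
  have h := loop2_eq a
    ((PySem.List.enumerate a 0).foldl
      (fun (st : PySem.Dict Int Int × List Int) ix =>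
        if ix.2 = -1 then (st.1.insert ix.1 (-1), st.2) else (st.1, st.2 ++ [ix.2]))
      (PySem.Dict.empty, [])).1
    (PySem.List.sorted ([] ++ a.filter (fun x => decide (x ≠ -1))) (fun x => x) false)
    (by
      intro k hk hx
      have : a[k]? = some (-1) := by rw [List.getElem?_eq_getElem hk, hx]
      have := phase1_get?_pos a 0 PySem.Dict.empty [] k this
      simpa using this)
    (by
      intro k hk hx
      have hnone : ∀ j : Nat, (k : Int) = 0 + j → a[j]? ≠ some (-1) := by
        intro j hj hsome
        have hjk : j = k := by omega
        subst hjk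
        rw [List.getElem?_eq_getElem hk] at hsome
        exact hx (by injection hsome)
      have := phase1_get?_neg a 0 PySem.Dict.empty [] (k : Int) hnone
      simpa [PySem.Dict.get?, PySem.Dict.empty] using this)
    a 0 (by simp) [] 0
  rw [mergeMin_eq_mergeNext a (a.filter (fun x => decide (x ≠ -1)))
    (by simp [List.countP_eq_length_filter])]
  simpa using h
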